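-- pv_equiv track=rewrite | github.com/atiselsts/feature-group-selection | energy-model/calc_energy_costs.py | stat_feature_plain
-- ===== SOURCE A (Python) =====
-- MAX_LEN = 64
--
-- def plain_dumps(data, data_size):
--     return " " * (len(data) * data_size)
--
-- def stat_feature_plain(data, key, data_size = 4):
--     num_bytes = 0
--     lst = []
--     last_bytes = 0
--     for v in data[key]:
--         lst.append(v)
--         # try to compress; if fits in packet, use it
--         plain_blob = plain_dumps(lst, data_size)
--         if len(plain_blob) > MAX_LEN:
--             num_bytes += last_bytes
--             lst = []
--         else:
--             last_bytes = len(plain_blob)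
--     # add the final bit, if needed
--     if len(lst):
--         num_bytes += len(plain_dumps(lst, data_size))
--     return num_bytes
-- ===== SOURCE B (Python) =====
-- MAX_LEN = 64
--
-- def stat_feature_plain(data, key, data_size = 4):
--     # Closed form: a packet holds m = MAX_LEN // data_size values; the value that
--     # overflows a packet is dropped, so each period of m+1 values costs m*data_size
--     # bytes, and the leftover values cost data_size each.
--     n = len(data[key])
--     if data_size <= 0:
--         return 0
--     m = MAX_LEN // data_size
--     return (n // (m + 1)) * (m * data_size) + (n % (m + 1)) * data_size
-- ===== Notes on version B (the rewrite author's own statement) =====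
-- stated objective: faster
-- what changed: Replaces the per-element packet-filling simulation loop with a closed-form formula: each period of m+1 values (m = MAX_LEN // data_size) costs m*data_size bytes and the leftover values cost data_size each, with a data_size <= 0 guard returning 0.
import Mathlib
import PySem

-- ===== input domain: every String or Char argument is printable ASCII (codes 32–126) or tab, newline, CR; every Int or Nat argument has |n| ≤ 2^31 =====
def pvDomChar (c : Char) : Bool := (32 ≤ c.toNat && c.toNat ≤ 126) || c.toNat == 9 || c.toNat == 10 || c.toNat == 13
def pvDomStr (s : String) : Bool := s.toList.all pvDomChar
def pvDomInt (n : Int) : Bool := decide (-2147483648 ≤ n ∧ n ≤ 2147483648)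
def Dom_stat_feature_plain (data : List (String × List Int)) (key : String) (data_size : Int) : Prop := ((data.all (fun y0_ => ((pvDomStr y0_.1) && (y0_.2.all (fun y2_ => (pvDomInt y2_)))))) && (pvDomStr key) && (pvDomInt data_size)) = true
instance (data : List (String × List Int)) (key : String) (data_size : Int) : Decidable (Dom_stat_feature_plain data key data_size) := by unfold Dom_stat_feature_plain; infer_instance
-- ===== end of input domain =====

-- B replaces A's per-element packet simulation by a closed-form count of full packet
-- periods plus the leftover (objective: faster, O(1) arithmetic instead of a loop).

-- ===== PORT A =====
-- port of len(plain_dumps(lst, data_size)): the string " " * k is only ever used via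
-- len(), and len(" " * k) = max 0 k exactly, so we port the length directly.
def pvPlainLen (lst : List Int) (data_size : Int) : Int :=
  max 0 ((lst.length : Int) * data_size)

-- the loop body of A: state = (num_bytes, lst, last_bytes)
def pvStep (data_size : Int) (s : Int × List Int × Int) (v : Int) : Int × List Int × Int :=
  let lst := s.2.1 ++ [v]
  let blob := pvPlainLen lst data_size
  if blob > 64 then (s.1 + s.2.2, ([] : List Int), s.2.2)
  else (s.1, lst, blob)

def stat_feature_plain (data : List (String × List Int)) (key : String) (data_size : Int) : Int :=
  let vals := (PySem.Dict.mk data).getD key []   -- data[key]; Pre_ excludes KeyError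
  let s := vals.foldl (pvStep data_size) (0, ([] : List Int), 0)
  if s.2.1 ≠ [] then s.1 + pvPlainLen s.2.1 data_size else s.1

-- ===== PORT B =====
def stat_feature_plain_alt (data : List (String × List Int)) (key : String) (data_size : Int) : Int :=
  let n : Int := (((PySem.Dict.mk data).getD key []).length : Int)
  if data_size ≤ 0 then 0
  else
    let m := PySem.Int.floordiv 64 data_size
    (PySem.Int.floordiv n (m + 1)) * (m * data_size) + (PySem.Int.mod n (m + 1)) * data_size

-- ===== PRECONDITION & SPEC =====
-- Pre_ excludes exactly the inputs where Python A raises KeyError (key not in data).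
def Pre_stat_feature_plain (data : List (String × List Int)) (key : String) (data_size : Int) : Prop :=
  (PySem.Dict.mk data).contains key = true
instance (data : List (String × List Int)) (key : String) (data_size : Int) : Decidable (Pre_stat_feature_plain data key data_size) := by unfold Pre_stat_feature_plain; infer_instance

def pvWitness_stat_feature_plain : (List (String × List Int)) × String × Int :=
  ([("k", [1, 2, 3])], "k", 4)

def Spec_stat_feature_plain (data : List (String × List Int)) (key : String) (data_size : Int) (out : Int) : Prop := out = stat_feature_plain_alt data key data_size
instance (data : List (String × List Int)) (key : String) (data_size : Int) (out : Int) : Decidable (Spec_stat_feature_plain data key data_size out) := by unfold Spec_stat_feature_plain; infer_instance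

-- ===== CLAIM (what is proved, stated in full; the proofs are below) =====
def Claim_equal_stat_feature_plain : Prop := ∀ (data : List (String × List Int)) (key : String) (data_size : Int), Dom_stat_feature_plain data key data_size → Pre_stat_feature_plain data key data_size → Spec_stat_feature_plain data key data_size (stat_feature_plain data key data_size)

-- ===== LEMMAS AND PROOFS =====

-- if data_size ≤ 0 every blob has length 0, so the loop just accumulates lst
lemma pvLoop_nonpos (ds : Int) (hds : ds ≤ 0) :
    ∀ (vs : List Int) (num : Int) (lst : List Int),
      vs.foldl (pvStep ds) (num, lst, 0) = (num, lst ++ vs, 0) := by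
  intro vs
  induction vs with
  | nil => intro num lst; simp
  | cons v vs ih =>
    intro num lst
    have hblob : pvPlainLen (lst ++ [v]) ds = 0 := by
      unfold pvPlainLen
      have : ((lst ++ [v]).length : Int) * ds ≤ 0 :=
        mul_nonpos_of_nonneg_of_nonpos (by positivity) hds
      omega
    simp only [List.foldl_cons, pvStep, hblob]
    norm_num
    rw [ih]
    simp

-- invariant run of the loop for data_size > 0, with m = 64 // data_size
lemma pvLoop_pos (ds m : Int) (hds : 0 < ds)
    (hml : m * ds ≤ 64) (hmu : 64 < (m + 1) * ds) :
    ∀ (vs : List Int) (num : Int) (lst : List Int) (lb : Int),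
      (lst.length : Int) ≤ m →
      (lst ≠ [] → lb = (lst.length : Int) * ds) →
      (m = 0 → lb = 0) →
      (let s := vs.foldl (pvStep ds) (num, lst, lb)
       if s.2.1 ≠ [] then s.1 + pvPlainLen s.2.1 ds else s.1)
      = num + (((lst.length : Int) + vs.length) / (m + 1)) * (m * ds)
            + ((((lst.length : Int) + vs.length)) % (m + 1)) * ds := by
  have hm0 : 0 ≤ m := by nlinarith
  intro vs
  induction vs with
  | nil =>
    intro num lst lb hlen hlb hlb0
    have h1 : ((lst.length : Int)) / (m + 1) = 0 :=
      Int.ediv_eq_zero_of_lt (by positivity) (by omega)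
    have h2 : ((lst.length : Int)) % (m + 1) = (lst.length : Int) :=
      Int.emod_eq_of_lt (by positivity) (by omega)
    simp only [List.foldl_nil, List.length_nil, Nat.cast_zero, add_zero, h1, h2]
    by_cases hl : lst = []
    · subst hl; simp
    · simp only [hl, ne_eq, not_false_iff, if_true]
      unfold pvPlainLen
      have : 0 ≤ (lst.length : Int) * ds := by positivity
      omega
  | cons v vs ih =>
    intro num lst lb hlen hlb hlb0
    have hlen1 : (((lst ++ [v]).length : Nat) : Int) = (lst.length : Int) + 1 := by simp
    have hlenc : (((v :: vs).length : Nat) : Int) = (vs.length : Int) + 1 := by simp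
    simp only [List.foldl_cons]
    by_cases hfull : (lst.length : Int) = m
    · -- overflow: blob = (m+1)*ds > 64, add last_bytes, reset lst
      have hblob : pvPlainLen (lst ++ [v]) ds > 64 := by
        unfold pvPlainLen
        rw [hlen1, hfull]
        omega
      have hlbval : lb = m * ds := by
        by_cases hl : lst = []
        · have : m = 0 := by subst hl; simpa using hfull.symm
          rw [hlb0 this, this]; ring
        · rw [hlb hl, hfull]
      have hstep : pvStep ds (num, lst, lb) v = (num + lb, ([] : List Int), lb) := by
        simp [pvStep, hblob]
      rw [hstep]
      have := ih (num + lb) [] lb (by simpa using hm0)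
        (by intro h; exact absurd rfl h) (fun h => by rw [hlbval, h]; ring)
      simp only [List.length_nil, Nat.cast_zero, zero_add] at this
      rw [this, hlbval, hfull, hlenc,
        show m + ((vs.length : Int) + 1) = (vs.length : Int) + (m + 1) * 1 from by ring,
        Int.add_mul_ediv_left _ _ (by omega : m + 1 ≠ 0),
        Int.add_mul_emod_self_left]
      ring
    · -- fits: blob = (len+1)*ds ≤ m*ds ≤ 64
      have hlt : (lst.length : Int) + 1 ≤ m := by omega
      have hblob : ¬ pvPlainLen (lst ++ [v]) ds > 64 := by
        unfold pvPlainLen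
        rw [hlen1]
        have h2 : ((lst.length : Int) + 1) * ds ≤ m * ds :=
          mul_le_mul_of_nonneg_right hlt (le_of_lt hds)
        omega
      have hstep : pvStep ds (num, lst, lb) v
          = (num, lst ++ [v], pvPlainLen (lst ++ [v]) ds) := by
        simp [pvStep, hblob]
      rw [hstep]
      have hplen : pvPlainLen (lst ++ [v]) ds = ((lst.length : Int) + 1) * ds := by
        unfold pvPlainLen
        rw [hlen1]
        have : 0 ≤ ((lst.length : Int) + 1) * ds := by positivity
        omega
      have := ih num (lst ++ [v]) (pvPlainLen (lst ++ [v]) ds)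
        (by rw [hlen1]; omega)
        (fun _ => by rw [hplen, hlen1])
        (fun h => by exfalso; rw [h] at hlt; omega)
      rw [this, hlen1, hlenc,
        show (lst.length : Int) + 1 + (vs.length : Int)
           = (lst.length : Int) + ((vs.length : Int) + 1) from by ring]

-- ===== VERDICT (by name: the statement is the Claim_ definition above) =====
theorem stat_feature_plain_spec : Claim_equal_stat_feature_plain := by
  intro data key ds _ _
  unfold Spec_stat_feature_plain stat_feature_plain stat_feature_plain_alt
  set vals := (PySem.Dict.mk data).getD key [] with hvals
  by_cases hds : ds ≤ 0
  · simp only [hds, if_true]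
    have := pvLoop_nonpos ds hds vals 0 []
    simp only [List.nil_append] at this
    simp only [this]
    by_cases hv : vals = []
    · simp [hv]
    · simp only [hv, ne_eq, not_false_iff, if_true]
      unfold pvPlainLen
      have : (vals.length : Int) * ds ≤ 0 :=
        mul_nonpos_of_nonneg_of_nonpos (by positivity) hds
      omega
  · have hds' : 0 < ds := by omega
    set m := PySem.Int.floordiv 64 ds with hm
    have hchar : m * ds ≤ 64 ∧ 64 < (m + 1) * ds := by
      have := (PySem.Int.floordiv_eq_iff_of_pos hds' (a := 64) (q := m)).mp hm.symm
      constructor <;> nlinarith [this.1, this.2]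
    have hm0 : 0 ≤ m := by
      by_contra h
      rw [not_le] at h
      have : (m + 1) * ds ≤ 0 := mul_nonpos_iff.mpr (Or.inr ⟨by omega, le_of_lt hds'⟩)
      omega
    have hrun := pvLoop_pos ds m hds' hchar.1 hchar.2 vals 0 [] 0
      (by simpa using hm0) (by intro h; exact absurd rfl h) (fun _ => rfl)
    simp only [List.length_nil, Nat.cast_zero, zero_add] at hrun
    simp only [hds, if_false]
    rw [hrun,
      PySem.Int.floordiv_eq_ediv_of_pos (by omega),
      PySem.Int.mod_eq_emod_of_pos (by omega)]
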